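-- pv_equiv track=rewrite | github.com/yyoud/userlib2 | Userlib/utils/security_utils/Security.py | maj
-- ===== SOURCE A (Python) =====
-- def maj(hex_list):
--     n = len(hex_list)
--     xor_result = 0
--     for i in range(n):
--         for j in range(i + 1, n):
--             # Compute AND operation for each pair
--             and_result = hex_list[i] & hex_list[j]
--             # XOR the result into the final result
--             xor_result ^= and_result
--     return xor_result & 0xFFFFFFFF
-- ===== SOURCE B (Python) =====
-- def maj(hex_list):
--     # One pass: AND distributes over XOR, so XOR_{i<j} (a_i & a_j)
--     # equals XOR_j (a_j & (a_0 ^ ... ^ a_{j-1})).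
--     r = 0
--     p = 0  # XOR of the elements seen so far
--     for x in hex_list:
--         r ^= x & p
--         p ^= x
--     return r & 0xFFFFFFFF
-- ===== Notes on version B (the rewrite author's own statement) =====
-- stated objective: faster
-- what changed: Replaces the quadratic double loop over all pairs by a single pass keeping a running XOR p of the elements seen so far, using that AND distributes over XOR: XOR_{i<j}(a_i & a_j) = XOR_j (a_j & (a_0 ^ ... ^ a_{j-1})).
import Mathlib
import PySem

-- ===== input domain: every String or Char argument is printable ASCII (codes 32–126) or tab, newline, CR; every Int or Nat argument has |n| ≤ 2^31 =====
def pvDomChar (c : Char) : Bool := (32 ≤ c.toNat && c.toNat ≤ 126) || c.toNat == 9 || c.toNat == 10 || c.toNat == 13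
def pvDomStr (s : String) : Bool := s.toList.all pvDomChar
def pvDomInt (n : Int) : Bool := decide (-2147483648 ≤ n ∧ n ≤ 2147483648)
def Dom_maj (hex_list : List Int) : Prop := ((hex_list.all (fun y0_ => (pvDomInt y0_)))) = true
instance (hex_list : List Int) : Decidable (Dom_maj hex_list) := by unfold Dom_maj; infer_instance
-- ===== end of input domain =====

-- B replaces A's quadratic pairwise loop by one linear pass with a running XOR (objective: faster).

-- ===== PORT A =====
def maj (hex_list : List Int) : Int :=
  let n : Int := PySem.List.len hex_list
  let xor_result : Int :=
    (PySem.List.pyRange 0 n 1).foldl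
      (fun acc i =>
        (PySem.List.pyRange (i + 1) n 1).foldl
          (fun acc2 j =>
            PySem.Int.bxor acc2
              (PySem.Int.band (PySem.List.pyGetD hex_list i 0) (PySem.List.pyGetD hex_list j 0)))
          acc)
      0
  PySem.Int.band xor_result 4294967295

-- ===== PORT B =====
def maj_alt (hex_list : List Int) : Int :=
  let s : Int × Int :=
    hex_list.foldl
      (fun (s : Int × Int) x => (PySem.Int.bxor s.1 (PySem.Int.band x s.2), PySem.Int.bxor s.2 x))
      (0, 0)
  PySem.Int.band s.1 4294967295

-- ===== PRECONDITION & SPEC =====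
def Spec_maj (hex_list : List Int) (out : Int) : Prop := out = maj_alt hex_list
instance (hex_list : List Int) (out : Int) : Decidable (Spec_maj hex_list out) := by unfold Spec_maj; infer_instance

-- ===== CLAIM (what is proved, stated in full; the proofs are below) =====
def Claim_equal_maj : Prop := ∀ (hex_list : List Int), Dom_maj hex_list → Spec_maj hex_list (maj hex_list)

-- ===== LEMMAS AND PROOFS =====

-- bit k of the (infinite two's-complement) integer a, Python-style
def pvIbit (a : Int) (k : Nat) : Bool :=
  if 0 ≤ a then a.toNat.testBit k else !((-a - 1).toNat.testBit k)

-- disjoint binary addition is bitwise or (not in the libraries for Nat)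
lemma pv_add_eq_or (x : Nat) : ∀ y : Nat, x &&& y = 0 → x + y = x ||| y := by
  induction x using Nat.strong_induction_on with
  | _ x ih =>
    intro y h
    rcases Nat.eq_zero_or_pos x with hx | hx
    · subst hx; simp
    · have hdiv : x / 2 &&& y / 2 = 0 := by
        rw [← Nat.and_div_two, h]
      have h2 : x / 2 + y / 2 = x / 2 ||| y / 2 :=
        ih (x / 2) (Nat.div_lt_self hx (by norm_num)) (y / 2) hdiv
      have hor2 : (x ||| y) / 2 = x / 2 ||| y / 2 := Nat.or_div_two
      have hmod : (x ||| y) % 2 = x % 2 + y % 2 := by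
        have t : (x ||| y).testBit 0 = (x.testBit 0 || y.testBit 0) := by
          simp
        have ta : (x.testBit 0 && y.testBit 0) = false := by
          have hz : (x &&& y).testBit 0 = false := by rw [h]; exact Nat.zero_testBit 0
          simpa [Nat.testBit_and] using hz
        rcases Nat.mod_two_eq_zero_or_one x with hxm | hxm <;>
          rcases Nat.mod_two_eq_zero_or_one y with hym | hym <;>
            rcases Nat.mod_two_eq_zero_or_one (x ||| y) with hom | hom <;>
              simp [hxm, hym, hom] at t ta ⊢
      have hx2 := Nat.div_add_mod x 2
      have hy2 := Nat.div_add_mod y 2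
      have hxy2 := Nat.div_add_mod (x ||| y) 2
      omega

-- subtracting a submask is xor with it
lemma pv_sub_and (m n : Nat) : m - (m &&& n) = m ^^^ (m &&& n) := by
  have hdisj : (m ^^^ (m &&& n)) &&& (m &&& n) = 0 := by
    apply Nat.eq_of_testBit_eq
    intro k
    simp only [Nat.testBit_and, Nat.testBit_xor, Nat.zero_testBit]
    cases m.testBit k <;> cases n.testBit k <;> rfl
  have hor : (m ^^^ (m &&& n)) ||| (m &&& n) = m := by
    apply Nat.eq_of_testBit_eq
    intro k
    simp only [Nat.testBit_and, Nat.testBit_xor, Nat.testBit_or]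
    cases m.testBit k <;> cases n.testBit k <;> rfl
  have hadd := pv_add_eq_or _ _ hdisj
  have hle : m &&& n ≤ m := Nat.and_le_left
  omega

lemma pvIbit_band (a b : Int) (k : Nat) :
    pvIbit (PySem.Int.band a b) k = (pvIbit a k && pvIbit b k) := by
  unfold pvIbit PySem.Int.band
  by_cases ha : 0 ≤ a <;> by_cases hb : 0 ≤ b <;> simp only [ha, hb, if_true, if_false]
  · have h : (0:Int) ≤ ((a.toNat &&& b.toNat : Nat) : Int) := Int.natCast_nonneg _
    simp [h, Nat.testBit_and]
  · have h : (0:Int) ≤ ((a.toNat - (a.toNat &&& (-b - 1).toNat) : Nat) : Int) := Int.natCast_nonneg _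
    simp only [h, if_true, Int.toNat_natCast]
    rw [pv_sub_and]
    simp only [Nat.testBit_xor, Nat.testBit_and]
    cases a.toNat.testBit k <;> cases (-b - 1).toNat.testBit k <;> rfl
  · have h : (0:Int) ≤ ((b.toNat - (b.toNat &&& (-a - 1).toNat) : Nat) : Int) := Int.natCast_nonneg _
    simp only [h, if_true, Int.toNat_natCast]
    rw [pv_sub_and]
    simp only [Nat.testBit_xor, Nat.testBit_and]
    cases b.toNat.testBit k <;> cases (-a - 1).toNat.testBit k <;> rfl
  · have h : ¬ (0:Int) ≤ -(((-a - 1).toNat ||| (-b - 1).toNat : Nat) : Int) - 1 := by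
      have := Int.natCast_nonneg ((-a - 1).toNat ||| (-b - 1).toNat); omega
    simp only [h, if_false]
    have h2 : (-(-(((-a - 1).toNat ||| (-b - 1).toNat : Nat) : Int) - 1) - 1).toNat
        = (-a - 1).toNat ||| (-b - 1).toNat := by omega
    rw [h2]
    simp only [Nat.testBit_or]
    cases (-a - 1).toNat.testBit k <;> cases (-b - 1).toNat.testBit k <;> rfl

lemma pvIbit_bxor (a b : Int) (k : Nat) :
    pvIbit (PySem.Int.bxor a b) k = xor (pvIbit a k) (pvIbit b k) := by
  unfold pvIbit PySem.Int.bxor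
  by_cases ha : 0 ≤ a <;> by_cases hb : 0 ≤ b <;> simp only [ha, hb, if_true, if_false]
  · have h : (0:Int) ≤ ((a.toNat ^^^ b.toNat : Nat) : Int) := Int.natCast_nonneg _
    simp [h, Nat.testBit_xor]
  · have h : ¬ (0:Int) ≤ -((a.toNat ^^^ (-b - 1).toNat : Nat) : Int) - 1 := by
      have := Int.natCast_nonneg (a.toNat ^^^ (-b - 1).toNat); omega
    simp only [h, if_false]
    have h2 : (-(-((a.toNat ^^^ (-b - 1).toNat : Nat) : Int) - 1) - 1).toNat
        = a.toNat ^^^ (-b - 1).toNat := by omega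
    rw [h2]
    simp only [Nat.testBit_xor]
    cases a.toNat.testBit k <;> cases (-b - 1).toNat.testBit k <;> rfl
  · have h : ¬ (0:Int) ≤ -(((-a - 1).toNat ^^^ b.toNat : Nat) : Int) - 1 := by
      have := Int.natCast_nonneg ((-a - 1).toNat ^^^ b.toNat); omega
    simp only [h, if_false]
    have h2 : (-(-(((-a - 1).toNat ^^^ b.toNat : Nat) : Int) - 1) - 1).toNat
        = (-a - 1).toNat ^^^ b.toNat := by omega
    rw [h2]
    simp only [Nat.testBit_xor]
    cases (-a - 1).toNat.testBit k <;> cases b.toNat.testBit k <;> rfl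
  · have h : (0:Int) ≤ (((-a - 1).toNat ^^^ (-b - 1).toNat : Nat) : Int) := Int.natCast_nonneg _
    simp only [h, if_true, Int.toNat_natCast]
    simp only [Nat.testBit_xor]
    cases (-a - 1).toNat.testBit k <;> cases (-b - 1).toNat.testBit k <;> rfl

lemma pvIbit_ext (a b : Int) (h : ∀ k, pvIbit a k = pvIbit b k) : a = b := by
  unfold pvIbit at h
  by_cases ha : 0 ≤ a <;> by_cases hb : 0 ≤ b <;> simp only [ha, hb, if_true, if_false] at h
  · have := Nat.eq_of_testBit_eq (x := a.toNat) (y := b.toNat) h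
    omega
  · exfalso
    have hk := h (max a.toNat (-b - 1).toNat)
    rw [Nat.testBit_lt_two_pow (Nat.lt_of_lt_of_le (Nat.lt_two_pow_self)
          (Nat.pow_le_pow_right (by norm_num) (le_max_left _ _))),
        Nat.testBit_lt_two_pow (Nat.lt_of_lt_of_le (Nat.lt_two_pow_self)
          (Nat.pow_le_pow_right (by norm_num) (le_max_right _ _)))] at hk
    simp at hk
  · exfalso
    have hk := h (max (-a - 1).toNat b.toNat)
    rw [Nat.testBit_lt_two_pow (Nat.lt_of_lt_of_le (Nat.lt_two_pow_self)
          (Nat.pow_le_pow_right (by norm_num) (le_max_left _ _))),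
        Nat.testBit_lt_two_pow (Nat.lt_of_lt_of_le (Nat.lt_two_pow_self)
          (Nat.pow_le_pow_right (by norm_num) (le_max_right _ _)))] at hk
    simp at hk
  · have := Nat.eq_of_testBit_eq (x := (-a - 1).toNat) (y := (-b - 1).toNat)
      (fun k => by have := h k; simpa using this)
    omega

lemma pv_bxor_assoc (a b c : Int) :
    PySem.Int.bxor (PySem.Int.bxor a b) c = PySem.Int.bxor a (PySem.Int.bxor b c) := by
  apply pvIbit_ext
  intro k
  simp only [pvIbit_bxor]
  cases pvIbit a k <;> cases pvIbit b k <;> cases pvIbit c k <;> rfl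

lemma pv_band_bxor_distrib (x y z : Int) :
    PySem.Int.band x (PySem.Int.bxor y z)
      = PySem.Int.bxor (PySem.Int.band x y) (PySem.Int.band x z) := by
  apply pvIbit_ext
  intro k
  simp only [pvIbit_bxor, pvIbit_band]
  cases pvIbit x k <;> cases pvIbit y k <;> cases pvIbit z k <;> rfl

-- XOR of all elements, and the pairwise AND-XOR value
def pvXorAll (l : List Int) : Int := l.foldr PySem.Int.bxor 0

def pvAval : List Int → Int
  | [] => 0
  | x :: l => PySem.Int.bxor (PySem.Int.band x (pvXorAll l)) (pvAval l)

lemma pv_zero_bxor (a : Int) : PySem.Int.bxor 0 a = a := by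
  rw [PySem.Int.bxor_comm]; exact PySem.Int.bxor_zero a

lemma pv_zero_band (a : Int) : PySem.Int.band 0 a = 0 := by
  rw [PySem.Int.band_comm]; exact PySem.Int.band_zero a

-- the inner j-loop of A computes init ^ (v & xorAll l)
lemma pv_foldl_bxor_band (v : Int) :
    ∀ (l : List Int) (init : Int),
      l.foldl (fun acc y => PySem.Int.bxor acc (PySem.Int.band v y)) init
        = PySem.Int.bxor init (PySem.Int.band v (pvXorAll l)) := by
  intro l
  induction l with
  | nil => intro init; simp [pvXorAll, PySem.Int.band_zero, PySem.Int.bxor_zero]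
  | cons y l ih =>
    intro init
    rw [List.foldl_cons, ih, pv_bxor_assoc]
    have : pvXorAll (y :: l) = PySem.Int.bxor y (pvXorAll l) := rfl
    rw [this, pv_band_bxor_distrib]

-- invariant of B's single pass
lemma pvB_inv :
    ∀ (l : List Int) (r p : Int),
      (l.foldl (fun (s : Int × Int) x =>
          (PySem.Int.bxor s.1 (PySem.Int.band x s.2), PySem.Int.bxor s.2 x)) (r, p)).1
        = PySem.Int.bxor r (PySem.Int.bxor (PySem.Int.band p (pvXorAll l)) (pvAval l)) := by
  intro l
  induction l with
  | nil =>
    intro r p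
    simp [pvAval, pvXorAll, PySem.Int.band_zero, PySem.Int.bxor_zero]
  | cons x l ih =>
    intro r p
    rw [List.foldl_cons, ih]
    have hx : pvXorAll (x :: l) = PySem.Int.bxor x (pvXorAll l) := rfl
    rw [hx]
    show _ = PySem.Int.bxor r (PySem.Int.bxor
        (PySem.Int.band p (PySem.Int.bxor x (pvXorAll l))) (pvAval (x :: l)))
    apply pvIbit_ext
    intro k
    simp only [pvAval, pvIbit_bxor, pvIbit_band]
    cases pvIbit r k <;> cases pvIbit p k <;> cases pvIbit x k <;>
      cases pvIbit (pvXorAll l) k <;> cases pvIbit (pvAval l) k <;> rfl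

-- A's double loop, started at index k, computes init ^ pvAval (l.drop k)
lemma pv_outer_aux (l : List Int) :
    ∀ (n k : Nat) (init : Int), l.length - k = n →
      (PySem.List.pyRange (k : Int) (PySem.List.len l) 1).foldl
        (fun acc i =>
          (PySem.List.pyRange (i + 1) (PySem.List.len l) 1).foldl
            (fun acc2 j =>
              PySem.Int.bxor acc2
                (PySem.Int.band (PySem.List.pyGetD l i 0) (PySem.List.pyGetD l j 0)))
            acc)
        init
      = PySem.Int.bxor init (pvAval (l.drop k)) := by
  intro n
  induction n with
  | zero =>
    intro k init hn
    have hk : l.length ≤ k := by omega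
    rw [PySem.List.pyRange_one_eq_nil (by simp [PySem.List.len_eq]; exact_mod_cast hk)]
    rw [List.drop_eq_nil_of_le hk]
    simp [pvAval, PySem.Int.bxor_zero]
  | succ n ih =>
    intro k init hn
    have hk : k < l.length := by omega
    have hcast : ((k : Int) + 1) = ((k + 1 : Nat) : Int) := by push_cast; ring
    rw [PySem.List.pyRange_one_cons (by simp [PySem.List.len_eq]; exact_mod_cast hk)]
    rw [List.foldl_cons, hcast]
    have hinner :
        (PySem.List.pyRange ((k + 1 : Nat) : Int) (PySem.List.len l) 1).foldl
          (fun acc2 j =>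
            PySem.Int.bxor acc2
              (PySem.Int.band (PySem.List.pyGetD l (k : Int) 0) (PySem.List.pyGetD l j 0)))
          init
        = PySem.Int.bxor init
            (PySem.Int.band (PySem.List.pyGetD l (k : Int) 0) (pvXorAll (l.drop (k + 1)))) := by
      have h1 := PySem.List.foldl_pyRange_pyGetD (xs := l) (d := (0 : Int))
        (f := fun acc y => PySem.Int.bxor acc (PySem.Int.band (PySem.List.pyGetD l (k : Int) 0) y))
        (init := init) (a := ((k + 1 : Nat) : Int)) (Int.natCast_nonneg _)
      rw [Int.toNat_natCast] at h1
      exact h1.trans (pv_foldl_bxor_band _ _ _)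
    rw [hinner, ih (k + 1) _ (by omega)]
    rw [List.drop_eq_getElem_cons hk]
    have hget : PySem.List.pyGetD l (k : Int) 0 = l[k] := by
      rw [PySem.List.pyGetD_natCast]
      exact List.getD_eq_getElem l 0 hk
    rw [hget, pv_bxor_assoc]
    rfl

-- ===== VERDICT (by name: the statement is the Claim_ definition above) =====
theorem maj_spec : Claim_equal_maj := by
  intro hex_list _
  show maj hex_list = maj_alt hex_list
  have hA := pv_outer_aux hex_list hex_list.length 0 0 rfl
  simp only [Nat.cast_zero] at hA
  have hB := pvB_inv hex_list 0 0
  simp only [maj, maj_alt, hA, hB, List.drop_zero, pv_zero_band, pv_zero_bxor]
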